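-- pv_equiv track=rewrite | github.com/gegebenheiten/trial_agent | tools/ctg_extract/fill_ctg_table_with_llm.py | merge_nct_ids
-- ===== SOURCE A (Python) =====
-- from typing import Callable, Dict, Iterable, List, Optional, TextIO, Tuple
--
-- def merge_nct_ids(primary: List[str], secondary: List[str], limit: int = 0) -> List[str]:
--     seen = set()
--     ordered: List[str] = []
--     for source in (primary, secondary):
--         for nct_id in source:
--             if nct_id in seen:
--                 continue
--             seen.add(nct_id)
--             ordered.append(nct_id)
--             if limit and len(ordered) >= limit:
--                 return ordered
--     return ordered
-- ===== SOURCE B (Python) =====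
-- def merge_nct_ids(primary, secondary, limit=0):
--     combined = primary + secondary
--     merged = sorted(set(combined), key=combined.index)
--     return merged[:limit] if limit > 0 else merged
-- ===== Notes on version B (the rewrite author's own statement) =====
-- stated objective: alternative
-- what changed: Replaces A's nested scan with an explicit seen-set and a mid-loop early return by sorting the hash set of the concatenation by first-occurrence index and slicing once; Pre_ excludes negative limits, which are outside the natural domain of a count parameter and where A's single-element return is an accident of its truthiness check.
-- outside the precondition, e.g. on merge_nct_ids(['a', 'b', 'c'], [], -1): A returns ['a'], B returns ['a', 'b', 'c']
import Mathlib
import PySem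

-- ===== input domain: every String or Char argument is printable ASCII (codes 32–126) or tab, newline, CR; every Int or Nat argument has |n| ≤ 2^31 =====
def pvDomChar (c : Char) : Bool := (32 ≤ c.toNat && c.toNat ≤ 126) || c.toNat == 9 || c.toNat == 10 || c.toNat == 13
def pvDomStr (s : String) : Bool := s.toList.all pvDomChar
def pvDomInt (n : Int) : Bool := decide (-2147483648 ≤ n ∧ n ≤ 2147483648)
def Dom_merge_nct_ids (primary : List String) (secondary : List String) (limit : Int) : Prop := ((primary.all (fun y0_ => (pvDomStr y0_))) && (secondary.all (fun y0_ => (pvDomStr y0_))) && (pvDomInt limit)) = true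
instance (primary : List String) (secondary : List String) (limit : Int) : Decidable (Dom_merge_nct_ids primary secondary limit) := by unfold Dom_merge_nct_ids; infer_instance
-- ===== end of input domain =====

-- B drops A's seen-set loop with its mid-loop early return and instead sorts the hash set of
-- primary+secondary by first-occurrence index, then slices once (objective: alternative).

-- ===== PORT A =====
-- inner 'for nct_id in source' loop; returns (seen, ordered, returned-early?)
def mergeLoopA (limit : Int) : List String → PySem.Set String → List String → (PySem.Set String × List String × Bool)
  | [], seen, ordered => (seen, ordered, false)
  | x :: xs, seen, ordered =>
    if PySem.Set.contains seen x then
      mergeLoopA limit xs seen ordered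
    else
      let seen' := PySem.Set.add seen x
      let ordered' := ordered ++ [x]
      if limit ≠ 0 ∧ limit ≤ (ordered'.length : Int) then (seen', ordered', true)
      else mergeLoopA limit xs seen' ordered'

def merge_nct_ids (primary : List String) (secondary : List String) (limit : Int) : List String :=
  let r1 := mergeLoopA limit primary PySem.Set.empty []
  if r1.2.2 then r1.2.1
  else (mergeLoopA limit secondary r1.1 r1.2.1).2.1

-- ===== PORT B =====
-- key=combined.index ported as (index? combined x).getD 0 : every sorted element is in combined,
-- so index? is some there and the getD default is never used; Nat indices are exact for list.index.
def merge_nct_ids_alt (primary : List String) (secondary : List String) (limit : Int) : List String :=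
  let combined := primary ++ secondary
  let merged := PySem.List.sorted (PySem.Set.ofList combined)
      (fun x => (PySem.List.index? combined x).getD 0) false
  if 0 < limit then PySem.List.slice merged none (some limit) else merged

-- ===== PRECONDITION & SPEC =====
-- Pre_ excludes negative limits: a negative count is outside the natural domain of a limit
-- parameter, and A's single-element return there is an accident of its truthiness check.
def Pre_merge_nct_ids (primary : List String) (secondary : List String) (limit : Int) : Prop := 0 ≤ limit
instance (primary : List String) (secondary : List String) (limit : Int) : Decidable (Pre_merge_nct_ids primary secondary limit) := by unfold Pre_merge_nct_ids; infer_instance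

def pvWitness_merge_nct_ids : List String × List String × Int := (["NCT1", "NCT2"], ["NCT2", "NCT3"], 2)

def Spec_merge_nct_ids (primary : List String) (secondary : List String) (limit : Int) (out : List String) : Prop := out = merge_nct_ids_alt primary secondary limit
instance (primary : List String) (secondary : List String) (limit : Int) (out : List String) : Decidable (Spec_merge_nct_ids primary secondary limit out) := by unfold Spec_merge_nct_ids; infer_instance

-- ===== CLAIM (what is proved, stated in full; the proofs are below) =====
def Claim_equal_merge_nct_ids : Prop := ∀ (primary : List String) (secondary : List String) (limit : Int), Dom_merge_nct_ids primary secondary limit → Pre_merge_nct_ids primary secondary limit → Spec_merge_nct_ids primary secondary limit (merge_nct_ids primary secondary limit)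

-- ===== LEMMAS AND PROOFS =====

theorem set_add_of_mem {s : PySem.Set String} {x : String} (h : x ∈ s) :
    PySem.Set.add s x = s := by simp [PySem.Set.add, h]

theorem set_add_of_not_mem {s : PySem.Set String} {x : String} (h : x ∉ s) :
    PySem.Set.add s x = s ++ [x] := by simp [PySem.Set.add, h]

theorem set_update_nil (s : PySem.Set String) : PySem.Set.update s [] = s := by
  simp [PySem.Set.update]

theorem set_update_cons (s : PySem.Set String) (x : String) (xs : List String) :
    PySem.Set.update s (x :: xs) = PySem.Set.update (PySem.Set.add s x) xs := by
  simp [PySem.Set.update]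

-- Set.update only appends
theorem update_prefix (xs : List String) (s : PySem.Set String) :
    ∃ t, PySem.Set.update s xs = s ++ t := by
  induction xs generalizing s with
  | nil => exact ⟨[], by rw [set_update_nil]; simp⟩
  | cons x xs ih =>
    rw [set_update_cons]
    by_cases hm : x ∈ s
    · rw [set_add_of_mem hm]; exact ih s
    · rw [set_add_of_not_mem hm]
      obtain ⟨t, ht⟩ := ih (s ++ [x])
      exact ⟨x :: t, by rw [ht]; simp⟩

-- A's inner loop with limit = 0, invariant seen = ordered
theorem loopA_zero (xs o : List String) :
    mergeLoopA 0 xs o o = (PySem.Set.update o xs, PySem.Set.update o xs, false) := by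
  induction xs generalizing o with
  | nil => rw [set_update_nil]; simp [mergeLoopA]
  | cons x xs ih =>
    rw [set_update_cons]
    by_cases hm : x ∈ o
    · have hL : mergeLoopA 0 (x :: xs) o o = mergeLoopA 0 xs o o := by
        simp [mergeLoopA, hm]
      rw [hL, set_add_of_mem hm]; exact ih o
    · have hL : mergeLoopA 0 (x :: xs) o o = mergeLoopA 0 xs (o ++ [x]) (o ++ [x]) := by
        simp [mergeLoopA, hm]
      rw [hL, set_add_of_not_mem hm]; exact ih (o ++ [x])

-- A's inner loop with 0 < limit: the early return is truncation at limit
theorem loopA_pos (limit : Int) (h0 : 0 < limit) (xs o : List String)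
    (hlen : (o.length : Int) < limit) :
    mergeLoopA limit xs o o =
      (if limit ≤ ((PySem.Set.update o xs).length : Int)
       then ((PySem.Set.update o xs).take limit.toNat,
             (PySem.Set.update o xs).take limit.toNat, true)
       else (PySem.Set.update o xs, PySem.Set.update o xs, false)) := by
  induction xs generalizing o with
  | nil =>
    rw [set_update_nil, if_neg (by omega)]
    simp [mergeLoopA]
  | cons x xs ih =>
    rw [set_update_cons]
    by_cases hm : x ∈ o
    · have hL : mergeLoopA limit (x :: xs) o o = mergeLoopA limit xs o o := by
        simp [mergeLoopA, hm]
      rw [hL, set_add_of_mem hm]; exact ih o hlen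
    · by_cases hstop : limit ≤ ((o.length : Int) + 1)
      · have hL : mergeLoopA limit (x :: xs) o o = (PySem.Set.add o x, o ++ [x], true) := by
          simp only [mergeLoopA]
          rw [if_neg (by simp [hm]),
            if_pos ⟨by omega, by
              simp only [List.length_append, List.length_cons, List.length_nil]
              push_cast; omega⟩]
        have hlen1 : (o.length : Int) + 1 = limit := by omega
        obtain ⟨t, ht⟩ := update_prefix xs (o ++ [x])
        have hbig : limit ≤ ((PySem.Set.update (o ++ [x]) xs).length : Int) := by
          rw [ht, ← hlen1]
          simp only [List.length_append, List.length_cons, List.length_nil]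
          push_cast; omega
        have hnat : (o ++ [x]).length = limit.toNat := by
          simp only [List.length_append, List.length_cons, List.length_nil]
          omega
        rw [hL, set_add_of_not_mem hm, if_pos hbig, ht,
          List.take_append_of_le_length (le_of_eq hnat.symm),
          List.take_of_length_le (le_of_eq hnat)]
      · have hL : mergeLoopA limit (x :: xs) o o = mergeLoopA limit xs (o ++ [x]) (o ++ [x]) := by
          simp only [mergeLoopA]
          rw [if_neg (by simp [hm]),
            if_neg (by simp only [List.length_append, List.length_cons, List.length_nil]
                       push_cast
                       omega), set_add_of_not_mem hm]
        rw [hL, set_add_of_not_mem hm]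
        refine ih (o ++ [x]) ?_
        simp only [List.length_append, List.length_cons, List.length_nil]
        push_cast; omega

-- the first-occurrence indices of the elements of set(xs), in set order, are strictly increasing
theorem ofList_pairwise_index_lt (xs : List String) :
    (PySem.Set.ofList xs).Pairwise
      (fun a b => (PySem.List.index? xs a).getD 0 < (PySem.List.index? xs b).getD 0) := by
  induction xs using List.reverseRecOn with
  | nil => simp [PySem.Set.ofList]
  | append_singleton xs x ih =>
    rw [PySem.Set.ofList_append_singleton]
    by_cases hm : x ∈ PySem.Set.ofList xs
    · rw [set_add_of_mem hm]
      refine List.Pairwise.imp_of_mem ?_ ih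
      intro a b ha hb h
      have ha' : a ∈ xs := (PySem.Set.mem_ofList _ _).1 ha
      have hb' : b ∈ xs := (PySem.Set.mem_ofList _ _).1 hb
      rwa [PySem.List.index?_append_of_mem _ ha', PySem.List.index?_append_of_mem _ hb']
    · have hx : x ∉ xs := fun hc => hm ((PySem.Set.mem_ofList _ _).2 hc)
      rw [set_add_of_not_mem hm]
      refine List.pairwise_append.2 ⟨?_, ?_, ?_⟩
      · refine List.Pairwise.imp_of_mem ?_ ih
        intro a b ha hb h
        have ha' : a ∈ xs := (PySem.Set.mem_ofList _ _).1 ha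
        have hb' : b ∈ xs := (PySem.Set.mem_ofList _ _).1 hb
        rwa [PySem.List.index?_append_of_mem _ ha', PySem.List.index?_append_of_mem _ hb']
      · simp
      · intro a ha b hb
        have ha' : a ∈ xs := (PySem.Set.mem_ofList _ _).1 ha
        rw [List.mem_singleton] at hb; subst hb
        rw [PySem.List.index?_append_of_mem _ ha', PySem.List.index?_append_singleton_self xs _ hx]
        obtain ⟨k, hk⟩ := Option.isSome_iff_exists.1 ((PySem.List.index?_isSome_iff _ _).2 ha')
        obtain ⟨hlt, -, -⟩ := PySem.List.getElem_of_index?_eq_some hk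
        rw [hk]
        simp only [Option.getD_some]
        omega

-- sorting set(combined) by first-occurrence index is exactly the ordered dedup
theorem sorted_set_by_index (xs : List String) :
    PySem.List.sorted (PySem.Set.ofList xs)
        (fun x => (PySem.List.index? xs x).getD 0) false = PySem.Set.ofList xs :=
  PySem.List.sorted_eq_of_perm_of_pairwise_lt _ _ _ (List.Perm.refl _) (ofList_pairwise_index_lt xs)

-- ===== VERDICT (by name: the statement is the Claim_ definition above) =====
theorem merge_nct_ids_spec : Claim_equal_merge_nct_ids := by
  intro primary secondary limit _ hpre
  show merge_nct_ids primary secondary limit = merge_nct_ids_alt primary secondary limit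
  simp only [merge_nct_ids, merge_nct_ids_alt]
  rw [sorted_set_by_index, PySem.Set.ofList_append]
  have hempty : (PySem.Set.empty : PySem.Set String) = ([] : List String) := rfl
  by_cases h0 : limit = 0
  · subst h0
    simp only [lt_self_iff_false, if_false, hempty, loopA_zero]
    simp [PySem.Set.update_nil_left]
  · have hpos : 0 < limit := lt_of_le_of_ne hpre (Ne.symm h0)
    rw [if_pos hpos, PySem.List.slice_to _ (by omega), hempty,
      loopA_pos limit hpos primary [] (by simpa using hpos)]
    rw [show PySem.Set.update ([] : List String) primary = PySem.Set.ofList primary from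
      PySem.Set.update_nil_left primary]
    by_cases hbig : limit ≤ (((PySem.Set.ofList primary).length : Int))
    · rw [if_pos hbig]
      dsimp only
      rw [if_pos rfl]
      obtain ⟨t, ht⟩ := update_prefix secondary (PySem.Set.ofList primary)
      rw [ht, List.take_append_of_le_length (by omega)]
    · rw [if_neg hbig]
      dsimp only
      rw [if_neg (by simp), loopA_pos limit hpos secondary _ (by omega)]
      by_cases hb2 : limit ≤ (((PySem.Set.update (PySem.Set.ofList primary) secondary).length : Int))
      · rw [if_pos hb2]
      · rw [if_neg hb2, List.take_of_length_le (by omega)]
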